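-- pv_equiv track=rewrite | github.com/dohyeoplim/optimal-route-for-seoul-subway | planner_old.py | format_route
-- ===== SOURCE A (Python) =====
-- def format_route(path: list[str]) -> list[tuple[str, str]]:
--     legs: list[tuple[str, str]] = []
--     current_ln = None
--     segment: list[str] = []
--     for node in path:
--         st, ln_tag = node.rsplit(' ', 1)
--         ln = ln_tag.strip('()')
--         if ln != current_ln:
--             if segment:
--                 legs.append((current_ln, ' - '.join(segment)))
--             current_ln = ln
--             segment = [st]
--         else:
--             segment.append(st)
--     if segment:
--         legs.append((current_ln, ' - '.join(segment)))
--     return legs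
-- ===== SOURCE B (Python) =====
-- def format_route(path: list[str]) -> list[tuple[str, str]]:
--     # Phase 1: parse every node once into (station, line)
--     parsed = []
--     for node in path:
--         st, ln_tag = node.rsplit(' ', 1)
--         parsed.append((st, ln_tag.strip('()')))
--     # Phase 2: group consecutive runs with equal line by boundary scan
--     legs: list[tuple[str, str]] = []
--     i = 0
--     n = len(parsed)
--     while i < n:
--         ln = parsed[i][1]
--         j = i
--         while j < n and parsed[j][1] == ln:
--             j += 1
--         legs.append((ln, ' - '.join(st for st, _ in parsed[i:j])))
--         i = j
--     return legs
-- ===== Notes on version B (the rewrite author's own statement) =====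
-- stated objective: alternative
-- what changed: Replaces the single-pass current-line/segment state machine (with its two flush sites) by two phases: parse all nodes once into (station, line) pairs, then group maximal consecutive equal-line runs with an index boundary scan and join each run.
import Mathlib
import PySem

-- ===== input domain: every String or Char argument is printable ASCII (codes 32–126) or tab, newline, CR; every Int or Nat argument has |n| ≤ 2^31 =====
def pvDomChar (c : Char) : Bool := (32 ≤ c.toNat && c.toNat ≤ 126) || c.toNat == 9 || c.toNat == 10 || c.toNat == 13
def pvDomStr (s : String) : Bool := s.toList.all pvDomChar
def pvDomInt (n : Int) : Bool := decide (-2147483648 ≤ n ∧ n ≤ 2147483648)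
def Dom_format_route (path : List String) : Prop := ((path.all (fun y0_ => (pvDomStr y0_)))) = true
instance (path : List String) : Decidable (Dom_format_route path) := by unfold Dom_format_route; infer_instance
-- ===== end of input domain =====

-- B replaces A's one-pass state machine by parse-all-then-group-consecutive-runs; same cost, return values proved equal on Pre_ (nodes containing a space).

-- shared parsing helpers (both Pythons perform the identical node.rsplit(' ',1) + strip('()'))
-- exact port of s.rsplit(' ', 1): split at the RIGHTMOST space; none = no space (Python raises there)
def pvRsplitSpace1 : List Char → Option (List Char × List Char)
  | [] => none
  | c :: rest =>
    match pvRsplitSpace1 rest with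
    | some (a, b) => some (c :: a, b)
    | none => if c = ' ' then some ([], rest) else none

-- exact port of s.strip('()'): remove leading and trailing '(' / ')' characters
def pvStripParens (cs : List Char) : List Char :=
  ((cs.dropWhile (fun c => c = '(' || c = ')')).reverse.dropWhile (fun c => c = '(' || c = ')')).reverse

-- (st, ln) for one node; none exactly when the Python unpacking raises ValueError/IndexError (no space)
def pvParseNode (s : String) : Option (List Char × List Char) :=
  match pvRsplitSpace1 s.toList with
  | some (st, tag) => some (st, pvStripParens tag)
  | none => none

-- exact port of ' - '.join(segment) over char lists
def pvJoinSeg : List (List Char) → List Char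
  | [] => []
  | [x] => x
  | x :: xs => x ++ (' ' :: '-' :: ' ' :: pvJoinSeg xs)

-- ===== PORT A =====
-- A's loop state: legs, current_ln (None at start), segment; branches in A's order.
-- On a node with no space Python raises (outside Pre_); the port skips it.
def format_route_go : List String → List (String × String) → Option (List Char) → List (List Char) → List (String × String)
  | [], legs, cur, seg =>
    if seg = [] then legs else legs ++ [(String.mk (cur.getD []), String.mk (pvJoinSeg seg))]
  | node :: rest, legs, cur, seg =>
    match pvParseNode node with
    | none => format_route_go rest legs cur seg
    | some (st, ln) =>
      if some ln ≠ cur then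
        let legs' := if seg = [] then legs else legs ++ [(String.mk (cur.getD []), String.mk (pvJoinSeg seg))]
        format_route_go rest legs' (some ln) [st]
      else
        format_route_go rest legs cur (seg ++ [st])

def format_route (path : List String) : List (String × String) :=
  format_route_go path [] none []

-- ===== PORT B =====
-- B phase 2: take the maximal run of pairs with the head's line, emit one leg, continue after it
def pvGroupLegs : List (List Char × List Char) → List (String × String)
  | [] => []
  | (st, ln) :: rest =>
    (String.mk ln,
     String.mk (pvJoinSeg (st :: (rest.takeWhile (fun p => p.2 = ln)).map Prod.fst)))
      :: pvGroupLegs (rest.dropWhile (fun p => p.2 = ln))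
termination_by l => l.length
decreasing_by
  simpa using Nat.lt_succ_of_le (List.length_dropWhile_le _ _)

def format_route_alt (path : List String) : List (String × String) :=
  pvGroupLegs (path.filterMap pvParseNode)

-- ===== PRECONDITION & SPEC =====
-- Pre_ excludes exactly the inputs where Python A raises: a node with no space makes the
-- two-element unpacking of rsplit(' ', 1) raise ValueError (B's indexing raises there too).
def Pre_format_route (path : List String) : Prop :=
  ∀ s ∈ path, ' ' ∈ s.toList

instance (path : List String) : Decidable (Pre_format_route path) := by
  unfold Pre_format_route; infer_instance

def pvWitness_format_route : List String := ["Seoul Station (1)", "City Hall (1)", "Euljiro (2)"]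

def Spec_format_route (path : List String) (out : List (String × String)) : Prop := out = format_route_alt path
instance (path : List String) (out : List (String × String)) : Decidable (Spec_format_route path out) := by unfold Spec_format_route; infer_instance

-- ===== CLAIM (what is proved, stated in full; the proofs are below) =====
def Claim_equal_format_route : Prop := ∀ (path : List String), Dom_format_route path → Pre_format_route path → Spec_format_route path (format_route path)

-- ===== LEMMAS AND PROOFS =====

-- A's loop over the raw path equals the same loop over the parsed pairs
def pvLoopP : List (List Char × List Char) → List (String × String) → Option (List Char) → List (List Char) → List (String × String)
  | [], legs, cur, seg =>
    if seg = [] then legs else legs ++ [(String.mk (cur.getD []), String.mk (pvJoinSeg seg))]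
  | (st, ln) :: rest, legs, cur, seg =>
    if some ln ≠ cur then
      let legs' := if seg = [] then legs else legs ++ [(String.mk (cur.getD []), String.mk (pvJoinSeg seg))]
      pvLoopP rest legs' (some ln) [st]
    else
      pvLoopP rest legs cur (seg ++ [st])

theorem go_eq_loopP (path : List String) (legs : List (String × String))
    (cur : Option (List Char)) (seg : List (List Char)) :
    format_route_go path legs cur seg = pvLoopP (path.filterMap pvParseNode) legs cur seg := by
  induction path generalizing legs cur seg with
  | nil => rfl
  | cons node rest ih =>
    simp only [format_route_go, List.filterMap_cons]
    cases h : pvParseNode node with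
    | none => simpa using ih ..
    | some p =>
      obtain ⟨st, ln⟩ := p
      simp only [pvLoopP]
      split_ifs <;> simp [ih]

theorem loopP_open (l : List (List Char × List Char)) (ln : List Char)
    (seg : List (List Char)) (legs : List (String × String)) (hseg : seg ≠ []) :
    pvLoopP l legs (some ln) seg =
      legs ++ (String.mk ln,
        String.mk (pvJoinSeg (seg ++ (l.takeWhile (fun p => p.2 = ln)).map Prod.fst)))
        :: pvGroupLegs (l.dropWhile (fun p => p.2 = ln)) := by
  induction l generalizing ln seg legs with
  | nil => simp [pvLoopP, pvGroupLegs, hseg]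
  | cons hd tl ih =>
    obtain ⟨st, ln'⟩ := hd
    by_cases hln : ln' = ln
    · subst hln
      simp only [pvLoopP, List.takeWhile_cons, List.dropWhile_cons]
      have : ¬ (some ln' ≠ some ln') := by simp
      rw [if_neg this]
      rw [ih ln' (seg ++ [st]) legs (by simp)]
      simp
    · simp only [pvLoopP, List.takeWhile_cons, List.dropWhile_cons]
      have hne : (some ln' ≠ some ln) := by simpa using hln
      rw [if_pos hne, if_neg hseg]
      rw [ih ln' [st] _ (by simp)]
      simp [pvGroupLegs, hln]

-- ===== VERDICT (by name: the statement is the Claim_ definition above) =====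
theorem format_route_spec : Claim_equal_format_route := by
  intro path _ _
  unfold Spec_format_route format_route format_route_alt
  rw [go_eq_loopP]
  cases h : path.filterMap pvParseNode with
  | nil => simp [pvLoopP, pvGroupLegs]
  | cons hd tl =>
    obtain ⟨st, ln⟩ := hd
    simp only [pvLoopP]
    rw [if_pos (by simp), if_true]
    rw [loopP_open tl ln [st] [] (by simp)]
    simp [pvGroupLegs]
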